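-- pv_equiv track=rewrite | github.com/EimySenrioth/InfoAnalyzer-via-voz | il.py | localidad_mas_longeva
-- ===== SOURCE A (Python) =====
-- def localidad_mas_longeva(tuplas):
--     localidades = ["Barcelona", "Madrid", "Sevilla", "Valencia", "Zaragoza"]
--     edades_maximas_por_localidad = {}
--
--     for localidad in localidades:
--         personas_localidad = [tupla for tupla in tuplas if tupla[4] == localidad]
--         if personas_localidad:  # Check if the list is not empty
--             max_edad = max(tupla[2] for tupla in personas_localidad)  # Edad máxima de esa localidad
--             edades_maximas_por_localidad[localidad] = max_edad
--         else:
--             edades_maximas_por_localidad[localidad] = 0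
--
--     localidad_mas_longeva = max(edades_maximas_por_localidad, key=edades_maximas_por_localidad.get)
--
--     return localidad_mas_longeva
-- ===== SOURCE B (Python) =====
-- def localidad_mas_longeva(tuplas):
--     fijas = ["Barcelona", "Madrid", "Sevilla", "Valencia", "Zaragoza"]
--     max_por_loc = {}
--     for tupla in tuplas:
--         loc = tupla[4]
--         if loc in fijas:
--             if loc in max_por_loc:
--                 if tupla[2] > max_por_loc[loc]:
--                     max_por_loc[loc] = tupla[2]
--             else:
--                 max_por_loc[loc] = tupla[2]
--     mejor = "Barcelona"
--     mejor_edad = max_por_loc.get("Barcelona", 0)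
--     for loc in ("Madrid", "Sevilla", "Valencia", "Zaragoza"):
--         edad = max_por_loc.get(loc, 0)
--         if edad > mejor_edad:
--             mejor = loc
--             mejor_edad = edad
--     return mejor
-- ===== Notes on version B (the rewrite author's own statement) =====
-- stated objective: alternative
-- what changed: B replaces A's five filtered scans of the whole list (one per fixed locality) with a single pass that maintains a per-locality running maximum in a dict, then an explicit best-so-far loop over the five localities in fixed order instead of max(dict, key=dict.get).
import Mathlib
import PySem

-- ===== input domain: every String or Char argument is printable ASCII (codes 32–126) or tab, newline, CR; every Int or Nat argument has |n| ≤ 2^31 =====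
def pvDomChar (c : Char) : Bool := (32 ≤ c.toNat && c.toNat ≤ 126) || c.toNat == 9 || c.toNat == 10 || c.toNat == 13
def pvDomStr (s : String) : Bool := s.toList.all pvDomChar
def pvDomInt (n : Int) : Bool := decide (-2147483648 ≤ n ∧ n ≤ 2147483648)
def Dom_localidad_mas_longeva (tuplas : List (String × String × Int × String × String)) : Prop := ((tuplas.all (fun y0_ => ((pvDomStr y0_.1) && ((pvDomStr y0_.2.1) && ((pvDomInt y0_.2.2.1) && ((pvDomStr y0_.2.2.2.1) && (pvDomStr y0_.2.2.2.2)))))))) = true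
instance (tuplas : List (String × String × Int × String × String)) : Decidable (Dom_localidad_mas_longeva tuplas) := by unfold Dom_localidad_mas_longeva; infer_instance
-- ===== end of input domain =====

-- B makes one pass maintaining per-locality running maxima instead of A's five filtered scans of the whole list.


-- ===== PORT A =====
-- Python's inner `max(...)` and outer `max(dict, key=dict.get)` are ported with PySem.List.max?
-- (first extremal element); `.getD 0` / `.getD ""` only discharge the Option on lists that are
-- provably nonempty where Python calls max (exact there); `dict.get` is `getD _ 0` since every
-- key iterated over is present in the dict.
def localidad_mas_longeva (tuplas : List (String × String × Int × String × String)) : String :=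
  let localidades : List String := ["Barcelona", "Madrid", "Sevilla", "Valencia", "Zaragoza"]
  let edades : PySem.Dict String Int :=
    localidades.foldl (fun d localidad =>
      let personas := tuplas.filter (fun t => t.2.2.2.2 == localidad)
      if personas.isEmpty = false then
        d.insert localidad ((PySem.List.max? (personas.map (fun t => t.2.2.1)) (fun x => x)).getD 0)
      else
        d.insert localidad 0)
      PySem.Dict.empty
  (PySem.List.max? edades.keys (fun k => edades.getD k 0)).getD ""

-- ===== PORT B =====
def localidad_mas_longeva_alt (tuplas : List (String × String × Int × String × String)) : String :=
  let fijas : List String := ["Barcelona", "Madrid", "Sevilla", "Valencia", "Zaragoza"]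
  let maxPorLoc : PySem.Dict String Int :=
    tuplas.foldl (fun m tupla =>
      if fijas.contains tupla.2.2.2.2 then
        match m.get? tupla.2.2.2.2 with
        | some v => if tupla.2.2.1 > v then m.insert tupla.2.2.2.2 tupla.2.2.1 else m
        | none => m.insert tupla.2.2.2.2 tupla.2.2.1
      else m)
      PySem.Dict.empty
  let best :=
    (["Madrid", "Sevilla", "Valencia", "Zaragoza"] : List String).foldl
      (fun (best : String × Int) loc =>
        let edad := maxPorLoc.getD loc 0
        if edad > best.2 then (loc, edad) else best)
      ("Barcelona", maxPorLoc.getD "Barcelona" 0)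
  best.1

-- ===== PRECONDITION & SPEC =====
def Spec_localidad_mas_longeva (tuplas : List (String × String × Int × String × String)) (out : String) : Prop := out = localidad_mas_longeva_alt tuplas
instance (tuplas : List (String × String × Int × String × String)) (out : String) : Decidable (Spec_localidad_mas_longeva tuplas out) := by unfold Spec_localidad_mas_longeva; infer_instance

-- ===== CLAIM (what is proved, stated in full; the proofs are below) =====
def Claim_equal_localidad_mas_longeva : Prop := ∀ (tuplas : List (String × String × Int × String × String)), Dom_localidad_mas_longeva tuplas → Spec_localidad_mas_longeva tuplas (localidad_mas_longeva tuplas)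

-- ===== LEMMAS AND PROOFS =====

-- ages of the tuples belonging to locality loc, in list order
def pvAges (tuplas : List (String × String × Int × String × String)) (loc : String) : List Int :=
  (tuplas.filter (fun t => t.2.2.2.2 == loc)).map (fun t => t.2.2.1)

-- the per-locality value both programs end up associating with loc
def pvVal (tuplas : List (String × String × Int × String × String)) (loc : String) : Int :=
  match pvAges tuplas loc with
  | [] => 0
  | x :: t => t.foldl max x

-- B's running-max update on an optional current maximum
def pvOptStep (o : Option Int) (a : Int) : Option Int :=
  match o with
  | none => some a
  | some v => if a > v then some a else some v

theorem pvOptStep_some (l : List Int) : ∀ a : Int, l.foldl pvOptStep (some a) = some (l.foldl max a) := by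
  induction l with
  | nil => intro a; rfl
  | cons x t ih =>
    intro a
    have h : pvOptStep (some a) x = some (max a x) := by
      simp only [pvOptStep]
      split_ifs with h <;> (congr 1; omega)
    simp only [List.foldl, h, ih]

theorem pvFoldOpt (l : List Int) :
    l.foldl pvOptStep none = match l with | [] => none | x :: t => some (t.foldl max x) := by
  cases l with
  | nil => rfl
  | cons x t => simp only [List.foldl, pvOptStep, pvOptStep_some]

-- A's per-locality branch computes pvVal
theorem pvValA (tuplas : List (String × String × Int × String × String)) (loc : String) :
    (if (tuplas.filter (fun t => t.2.2.2.2 == loc)).isEmpty = false then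
       (PySem.List.max? ((tuplas.filter (fun t => t.2.2.2.2 == loc)).map (fun t => t.2.2.1)) (fun x => x)).getD 0
     else 0) = pvVal tuplas loc := by
  rcases h : tuplas.filter (fun t => t.2.2.2.2 == loc) with _ | ⟨x, t⟩ <;>
    simp [pvVal, pvAges, h, PySem.List.max?_id_cons]

-- merging the two insert branches of A's loop body
theorem pvInsertIte (d : PySem.Dict String Int) (l : String) (c : Bool) (x : Int) :
    (if c = false then d.insert l x else d.insert l 0) = d.insert l (if c = false then x else 0) := by
  cases c <;> rfl

-- B's scan: the stored optional maximum for a fixed locality is the fold of pvOptStep over its ages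
theorem pvFoldB (tuplas : List (String × String × Int × String × String)) (loc : String)
    (hloc : (["Barcelona", "Madrid", "Sevilla", "Valencia", "Zaragoza"] : List String).contains loc = true) :
    ∀ m : PySem.Dict String Int,
      (tuplas.foldl (fun m tupla =>
        if (["Barcelona", "Madrid", "Sevilla", "Valencia", "Zaragoza"] : List String).contains tupla.2.2.2.2 then
          match m.get? tupla.2.2.2.2 with
          | some v => if tupla.2.2.1 > v then m.insert tupla.2.2.2.2 tupla.2.2.1 else m
          | none => m.insert tupla.2.2.2.2 tupla.2.2.1
        else m) m).get? loc
      = (pvAges tuplas loc).foldl pvOptStep (m.get? loc) := by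
  induction tuplas with
  | nil => intro m; rfl
  | cons t ts ih =>
    intro m
    simp only [List.foldl]
    rw [ih]
    by_cases hc : t.2.2.2.2 = loc
    · subst hc
      have hstep :
          (if (["Barcelona", "Madrid", "Sevilla", "Valencia", "Zaragoza"] : List String).contains t.2.2.2.2 then
            match m.get? t.2.2.2.2 with
            | some v => if t.2.2.1 > v then m.insert t.2.2.2.2 t.2.2.1 else m
            | none => m.insert t.2.2.2.2 t.2.2.1
          else m).get? t.2.2.2.2 = pvOptStep (m.get? t.2.2.2.2) t.2.2.1 := by
        rw [hloc]
        simp only [if_true]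
        rcases hg : m.get? t.2.2.2.2 with _ | v
        · simp [pvOptStep, PySem.Dict.get?_insert_self]
        · simp only [pvOptStep]
          split_ifs with h
          · simp [PySem.Dict.get?_insert_self]
          · simp [hg]
      rw [hstep]
      simp [pvAges, List.filter]
    · have hne : loc ≠ t.2.2.2.2 := fun h => hc h.symm
      have hages : pvAges (t :: ts) loc = pvAges ts loc := by
        simp [pvAges, hc]
      rw [hages]
      congr 1
      split
      · rcases m.get? t.2.2.2.2 with _ | v
        · exact PySem.Dict.get?_insert_of_ne m t.2.2.1 hne
        · show (if t.2.2.1 > v then m.insert t.2.2.2.2 t.2.2.1 else m).get? loc = m.get? loc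
          split_ifs
          · exact PySem.Dict.get?_insert_of_ne m t.2.2.1 hne
          · rfl
      · rfl

-- the final selection: Python's max(d, key=d.get) over the five keys equals B's best-so-far loop,
-- given the two programs' key functions agree on the five localities
theorem pvFinal (f g : String → Int)
    (h1 : f "Barcelona" = g "Barcelona") (h2 : f "Madrid" = g "Madrid")
    (h3 : f "Sevilla" = g "Sevilla") (h4 : f "Valencia" = g "Valencia")
    (h5 : f "Zaragoza" = g "Zaragoza") :
    (PySem.List.max? (["Barcelona", "Madrid", "Sevilla", "Valencia", "Zaragoza"] : List String) f).getD ""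
    = ((["Madrid", "Sevilla", "Valencia", "Zaragoza"] : List String).foldl
        (fun (best : String × Int) loc => if g loc > best.2 then (loc, g loc) else best)
        ("Barcelona", g "Barcelona")).1 := by
  simp only [PySem.List.max?, List.foldl, h1, h2, h3, h4, h5]
  repeat (first | rfl | omega | (split_ifs <;> simp_all))

-- B's dict lookup: the value B's selection loop reads for each fixed locality is pvVal
theorem pvGetB (tuplas : List (String × String × Int × String × String)) (loc : String)
    (hloc : (["Barcelona", "Madrid", "Sevilla", "Valencia", "Zaragoza"] : List String).contains loc = true) :
    (tuplas.foldl (fun m tupla =>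
        if (["Barcelona", "Madrid", "Sevilla", "Valencia", "Zaragoza"] : List String).contains tupla.2.2.2.2 then
          match m.get? tupla.2.2.2.2 with
          | some v => if tupla.2.2.1 > v then m.insert tupla.2.2.2.2 tupla.2.2.1 else m
          | none => m.insert tupla.2.2.2.2 tupla.2.2.1
        else m) PySem.Dict.empty).getD loc 0 = pvVal tuplas loc := by
  rw [PySem.Dict.getD_eq_get?_getD, pvFoldB tuplas loc hloc PySem.Dict.empty]
  rw [PySem.Dict.get?_empty, pvFoldOpt]
  rcases h : pvAges tuplas loc with _ | ⟨x, t⟩ <;> simp [pvVal, h]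

-- ===== VERDICT (by name: the statement is the Claim_ definition above) =====
theorem localidad_mas_longeva_spec : Claim_equal_localidad_mas_longeva := by
  intro tuplas _
  unfold Spec_localidad_mas_longeva localidad_mas_longeva localidad_mas_longeva_alt
  simp only [List.foldl, pvInsertIte, pvValA]
  rw [show (((((PySem.Dict.empty.insert "Barcelona" (pvVal tuplas "Barcelona")).insert "Madrid"
        (pvVal tuplas "Madrid")).insert "Sevilla" (pvVal tuplas "Sevilla")).insert "Valencia"
        (pvVal tuplas "Valencia")).insert "Zaragoza" (pvVal tuplas "Zaragoza")).keys
      = ["Barcelona", "Madrid", "Sevilla", "Valencia", "Zaragoza"] from by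
    simp [PySem.Dict.keys_insert_of_not_contains, PySem.Dict.contains_insert,
      PySem.Dict.contains_empty, PySem.Dict.keys_empty]]
  have hB := fun loc hloc => pvGetB tuplas loc hloc
  have hfin := pvFinal (fun k =>
    (((((PySem.Dict.empty.insert "Barcelona" (pvVal tuplas "Barcelona")).insert "Madrid"
        (pvVal tuplas "Madrid")).insert "Sevilla" (pvVal tuplas "Sevilla")).insert "Valencia"
        (pvVal tuplas "Valencia")).insert "Zaragoza" (pvVal tuplas "Zaragoza")).getD k 0)
    (fun k =>
    (tuplas.foldl (fun m tupla =>
        if (["Barcelona", "Madrid", "Sevilla", "Valencia", "Zaragoza"] : List String).contains tupla.2.2.2.2 then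
          match m.get? tupla.2.2.2.2 with
          | some v => if tupla.2.2.1 > v then m.insert tupla.2.2.2.2 tupla.2.2.1 else m
          | none => m.insert tupla.2.2.2.2 tupla.2.2.1
        else m) PySem.Dict.empty).getD k 0)
    (by beta_reduce; rw [hB "Barcelona" (by decide)]; simp [PySem.Dict.getD_insert])
    (by beta_reduce; rw [hB "Madrid" (by decide)]; simp [PySem.Dict.getD_insert])
    (by beta_reduce; rw [hB "Sevilla" (by decide)]; simp [PySem.Dict.getD_insert])
    (by beta_reduce; rw [hB "Valencia" (by decide)]; simp [PySem.Dict.getD_insert])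
    (by beta_reduce; rw [hB "Zaragoza" (by decide)]; simp)
  exact hfin
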